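-- pv_equiv track=rewrite | github.com/ajalt/whatshouldicallmybro | wiktionary_parser/parse_wiktionary.py | make_word
-- ===== SOURCE A (Python) =====
-- def make_word(parts, sub, i):
--     """Replace a syllable in a list of words, and return the joined word."""
--     j = 0
--     for part in parts:
--         for k in range(len(part)):
--             if i == j:
--                 part[k] = sub
--                 return ' '.join(''.join(p for p in part) for part in parts)
--             j += 1
-- ===== SOURCE B (Python) =====
-- def make_word(parts, sub, i):
--     """Replace a syllable in a list of words, and return the joined word."""
--     count = 0
--     for idx, part in enumerate(parts):
--         if count <= i < count + len(part):
--             k = i - count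
--             new_parts = parts[:idx] + [part[:k] + [sub] + part[k + 1:]] + parts[idx + 1:]
--             return ' '.join(''.join(p) for p in new_parts)
--         count += len(part)
--     return None
-- ===== Notes on version B (the rewrite author's own statement) =====
-- stated objective: alternative
-- what changed: The inner per-syllable loop is replaced by an arithmetic range test on a running syllable count, and the replacement is done by list slicing instead of in-place mutation (return value identical; B does not mutate parts).
import Mathlib
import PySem

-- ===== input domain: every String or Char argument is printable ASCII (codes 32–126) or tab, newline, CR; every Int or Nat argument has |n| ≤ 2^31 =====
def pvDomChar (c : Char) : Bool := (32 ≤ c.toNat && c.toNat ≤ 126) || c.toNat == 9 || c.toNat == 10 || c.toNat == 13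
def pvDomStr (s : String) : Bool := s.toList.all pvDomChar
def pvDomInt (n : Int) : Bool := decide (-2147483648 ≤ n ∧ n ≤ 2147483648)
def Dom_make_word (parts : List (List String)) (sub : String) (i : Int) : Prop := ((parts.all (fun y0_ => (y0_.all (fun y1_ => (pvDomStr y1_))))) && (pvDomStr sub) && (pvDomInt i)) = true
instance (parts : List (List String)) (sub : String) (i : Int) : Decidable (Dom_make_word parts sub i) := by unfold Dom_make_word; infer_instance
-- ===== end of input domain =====

-- B replaces A's inner per-syllable loop by an arithmetic range test on a running
-- syllable count and builds the replaced list by slicing instead of in-place mutation;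
-- equivalence proved is about the RETURN value only (A mutates `parts`, B does not).

-- ' '.join(''.join(p for p in part) for part in parts) — shared by both ports
def joinWords (ps : List (List String)) : String :=
  PySem.Str.join " " (ps.map (fun part => PySem.Str.join "" part))

-- ===== PORT A =====
-- inner loop: for k in range(len(part)): if i == j: part[k] = sub; return-signal; j += 1
-- `pre` is the already-scanned prefix of `part`; result: (mutated part if returned, final j)
def innerA (pre rest : List String) (sub : String) (i j : Int) : Option (List String) × Int :=
  match rest with
  | [] => (none, j)
  | x :: xs =>
      if i = j then (some (pre ++ sub :: xs), j)
      else innerA (pre ++ [x]) xs sub i (j + 1)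

-- outer loop: `done` is the already-scanned prefix of `parts`
def outerA (done rest : List (List String)) (sub : String) (i j : Int) : Option String :=
  match rest with
  | [] => none
  | part :: rest' =>
      match innerA [] part sub i j with
      | (some newPart, _) => some (joinWords (done ++ newPart :: rest'))
      | (none, j') => outerA (done ++ [part]) rest' sub i j'

def make_word (parts : List (List String)) (sub : String) (i : Int) : Option String :=
  outerA [] parts sub i 0

-- ===== PORT B =====
-- for idx, part in enumerate(parts): if count <= i < count + len(part): slice-and-join; else count += len(part)
-- slices parts[:idx], parts[idx+1:], part[:k], part[k+1:] with nonnegative in-range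
-- indices are exactly take/drop
def goB (rest : List (List String)) (parts : List (List String)) (sub : String) (i : Int)
    (idx : Nat) (count : Int) : Option String :=
  match rest with
  | [] => none
  | part :: rest' =>
      if count ≤ i ∧ i < count + (part.length : Int) then
        let k := (i - count).toNat
        some (joinWords (parts.take idx ++ [part.take k ++ sub :: part.drop (k + 1)] ++ parts.drop (idx + 1)))
      else goB rest' parts sub i (idx + 1) (count + (part.length : Int))

def make_word_alt (parts : List (List String)) (sub : String) (i : Int) : Option String :=
  goB parts parts sub i 0 0

-- ===== PRECONDITION & SPEC =====
def Spec_make_word (parts : List (List String)) (sub : String) (i : Int) (out : Option String) : Prop := out = make_word_alt parts sub i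
instance (parts : List (List String)) (sub : String) (i : Int) (out : Option String) : Decidable (Spec_make_word parts sub i out) := by unfold Spec_make_word; infer_instance

-- ===== CLAIM (what is proved, stated in full; the proofs are below) =====
def Claim_equal_make_word : Prop := ∀ (parts : List (List String)) (sub : String) (i : Int), Dom_make_word parts sub i → Spec_make_word parts sub i (make_word parts sub i)

-- ===== LEMMAS AND PROOFS =====

-- characterisation of A's inner loop
theorem innerA_eq (rest : List String) : ∀ (pre : List String) (sub : String) (i j : Int),
    innerA pre rest sub i j =
      if j ≤ i ∧ i < j + (rest.length : Int) then
        (some (pre ++ rest.take (i - j).toNat ++ sub :: rest.drop ((i - j).toNat + 1)), i)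
      else (none, j + (rest.length : Int)) := by
  induction rest with
  | nil =>
      intro pre sub i j
      simp [innerA]
  | cons x xs ih =>
      intro pre sub i j
      by_cases h : i = j
      · subst h
        simp [innerA]
      · have hrec := ih (pre ++ [x]) sub i (j + 1)
        simp only [innerA, if_neg h, hrec]
        by_cases h2 : j + 1 ≤ i ∧ i < j + 1 + (xs.length : Int)
        · have hc : j ≤ i ∧ i < j + ((x :: xs).length : Int) := by
            simp only [List.length_cons]; push_cast; omega
          rw [if_pos h2, if_pos hc]
          have hk : (i - j).toNat = (i - (j + 1)).toNat + 1 := by omega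
          simp [hk, List.append_assoc]
        · have hc : ¬ (j ≤ i ∧ i < j + ((x :: xs).length : Int)) := by
            simp only [List.length_cons]; push_cast at *; omega
          rw [if_neg h2, if_neg hc]
          simp only [List.length_cons]
          push_cast
          ring_nf

-- A's outer loop with a scanned prefix `done` equals B's loop over the suffix
theorem outerA_eq_goB (rest : List (List String)) : ∀ (done : List (List String)) (sub : String) (i j : Int),
    outerA done rest sub i j = goB rest (done ++ rest) sub i done.length j := by
  induction rest with
  | nil => intro done sub i j; simp [outerA, goB]
  | cons part rest' ih =>
      intro done sub i j
      simp only [outerA, goB, innerA_eq]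
      by_cases h : j ≤ i ∧ i < j + (part.length : Int)
      · rw [if_pos h, if_pos h]
        have hd : done.drop (done.length + 1) = ([] : List (List String)) :=
          List.drop_eq_nil_of_le (by omega)
        simp [List.drop_append, List.drop_succ_cons, hd]
      · rw [if_neg h, if_neg h]
        have := ih (done ++ [part]) sub i (j + (part.length : Int))
        simpa [List.append_assoc] using this

-- ===== VERDICT (by name: the statement is the Claim_ definition above) =====
theorem make_word_spec : Claim_equal_make_word := by
  intro parts sub i _
  show make_word parts sub i = make_word_alt parts sub i
  have h := outerA_eq_goB parts [] sub i 0
  simpa [make_word, make_word_alt] using h
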